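-- pv_equiv track=rewrite | github.com/ShaharEli/algoTrain | 2020AB/2020AB.py | count_substrs
-- ===== SOURCE A (Python) =====
-- def count_substrs(string):
--     summ = 0
--     if not string:
--         return summ
--     tail = string[0]
--     rest = string[1:]
--     summ += 1 + rest.count(tail) + count_substrs(rest)
--     return summ
-- ===== SOURCE B (Python) =====
-- def count_substrs(string):
--     counts = {}
--     for ch in string:
--         counts[ch] = counts.get(ch, 0) + 1
--     return len(string) + sum(f * (f - 1) // 2 for f in counts.values())
-- ===== Notes on version B (the rewrite author's own statement) =====
-- stated objective: faster
-- what changed: Replaced the recursion that rescans every suffix (rest.count per character) by a single pass building a character-frequency dict, returning len(string) plus sum of C(f,2) over the frequencies.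
import Mathlib
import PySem

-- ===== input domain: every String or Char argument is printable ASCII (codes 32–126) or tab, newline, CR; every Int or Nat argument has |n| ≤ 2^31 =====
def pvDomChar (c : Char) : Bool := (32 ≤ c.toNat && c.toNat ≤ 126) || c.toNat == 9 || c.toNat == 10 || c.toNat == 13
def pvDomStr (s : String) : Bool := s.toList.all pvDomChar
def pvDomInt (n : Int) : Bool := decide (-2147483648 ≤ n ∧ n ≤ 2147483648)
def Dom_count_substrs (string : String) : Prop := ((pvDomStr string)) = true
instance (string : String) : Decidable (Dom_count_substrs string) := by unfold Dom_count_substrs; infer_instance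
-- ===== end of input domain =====

-- B replaces A's suffix-rescanning recursion by one frequency-counting pass: len(string) + sum of C(f,2) over character frequencies.

-- ===== PORT A =====
-- A recurses on the string: empty -> 0, else 1 + rest.count(string[0]) + count_substrs(rest).
def count_substrs_go : List Char → Int
  | [] => 0
  | c :: rest => 1 + (PySem.Chars.count rest [c] : Int) + count_substrs_go rest

def count_substrs (string : String) : Int := count_substrs_go string.toList

-- ===== PORT B =====
def count_substrs_alt (string : String) : Int :=
  let cs := string.toList
  let counts := cs.foldl (fun d ch => d.insert ch (d.getD ch 0 + 1)) PySem.Dict.empty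
  (cs.length : Int) + (counts.values.map (fun f => PySem.Int.floordiv (f * (f - 1)) 2)).sum

-- ===== PRECONDITION & SPEC =====
def Spec_count_substrs (string : String) (out : Int) : Prop := out = count_substrs_alt string
instance (string : String) (out : Int) : Decidable (Spec_count_substrs string out) := by unfold Spec_count_substrs; infer_instance

-- ===== CLAIM (what is proved, stated in full; the proofs are below) =====
def Claim_equal_count_substrs : Prop := ∀ (string : String), Dom_count_substrs string → Spec_count_substrs string (count_substrs string)

-- ===== LEMMAS AND PROOFS =====

-- str.count with a single-character needle is the plain character count
theorem chars_count_go_singleton (c : Char) (l : List Char) (fuel acc : Nat)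
    (h : l.length ≤ fuel) : PySem.Chars.count.go [c] fuel l acc = acc + l.count c := by
  induction l generalizing fuel acc with
  | nil => cases fuel <;> simp [PySem.Chars.count.go]
  | cons h' t ih =>
    cases fuel with
    | zero => simp at h
    | succ f =>
      rw [PySem.Chars.count.go]
      simp only [List.isPrefixOf, List.length_singleton, List.drop_one, List.tail_cons]
      by_cases hc : c = h'
      · subst hc
        simp [ih _ _ (by simpa using h), List.count_cons]
        omega
      · simp [hc, Ne.symm hc, ih _ _ (by simpa using h), beq_iff_eq]

theorem chars_count_singleton (l : List Char) (c : Char) :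
    PySem.Chars.count l [c] = l.count c := by
  have h := chars_count_go_singleton c l l.length 0 le_rfl
  simp only [PySem.Chars.count, List.isEmpty_cons]
  simpa using h

def pairSum (cs : List Char) : Int :=
  ((PySem.Set.ofList cs).map
    (fun k => PySem.Int.floordiv ((cs.count k : Int) * ((cs.count k : Int) - 1)) 2)).sum

-- the per-frequency contribution C(f,2) as summed by B
theorem floordiv_step (m : Int) :
    PySem.Int.floordiv ((m + 1) * (m + 1 - 1)) 2 = PySem.Int.floordiv (m * (m - 1)) 2 + m := by
  simp only [PySem.Int.floordiv]
  have h : (m + 1) * (m + 1 - 1) = m * (m - 1) + m * 2 := by ring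
  rw [h, Int.add_mul_fdiv_right _ _ (by norm_num)]

theorem pairSum_cons (c : Char) (t : List Char) :
    pairSum (c :: t) = (t.count c : Int) + pairSum t := by
  unfold pairSum
  rw [PySem.Set.ofList_cons]
  simp only [List.map_cons, List.sum_cons]
  rw [List.map_congr_left (l := PySem.Set.discard (PySem.Set.ofList t) c)
    (f := fun k => PySem.Int.floordiv (((c :: t).count k : Int) * (((c :: t).count k : Int) - 1)) 2)
    (g := fun k => PySem.Int.floordiv ((t.count k : Int) * ((t.count k : Int) - 1)) 2)
    (by
      intro k hk
      have hkc : c ≠ k :=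
        Ne.symm ((PySem.Set.mem_discard (s := PySem.Set.ofList t) (x := c) (y := k)).mp hk).2
      simp [hkc])]
  have hcc : (c :: t).count c = t.count c + 1 := by simp
  rw [hcc]
  push_cast
  rw [floordiv_step]
  have hnd : (PySem.Set.ofList t).Nodup := PySem.Set.nodup_ofList t
  by_cases hc : c ∈ t
  · have hmem : c ∈ PySem.Set.ofList t := (PySem.Set.mem_ofList t c).mpr hc
    have hperm := List.perm_cons_erase hmem
    have hsum := (hperm.map
      (fun k => PySem.Int.floordiv ((t.count k : Int) * ((t.count k : Int) - 1)) 2)).sum_eq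
    simp only [List.map_cons, List.sum_cons] at hsum
    have herase : (PySem.Set.ofList t).erase c = PySem.Set.discard (PySem.Set.ofList t) c := by
      rw [hnd.erase_eq_filter]
      rfl
    rw [hsum, herase]
    ring
  · have hdisc2 : PySem.Set.discard (PySem.Set.ofList t) c = PySem.Set.ofList t := by
      apply List.filter_eq_self.mpr
      intro k hk
      have hm : k ∈ t := (PySem.Set.mem_ofList t k).mp hk
      have : k ≠ c := fun h => hc (h ▸ hm)
      simp [this]
    have hcount : t.count c = 0 := List.count_eq_zero.mpr hc
    rw [hdisc2, hcount]
    simp [PySem.Int.floordiv]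

theorem countA_eq (cs : List Char) :
    count_substrs_go cs = (cs.length : Int) + pairSum cs := by
  induction cs with
  | nil => simp [count_substrs_go, pairSum, PySem.Set.ofList]
  | cons c t ih =>
    rw [count_substrs_go, chars_count_singleton, ih, pairSum_cons]
    push_cast [List.length_cons]
    ring

theorem countB_eq (cs : List Char) :
    (((cs.foldl (fun d ch => d.insert ch (d.getD ch 0 + 1)) PySem.Dict.empty).values.map
      (fun f => PySem.Int.floordiv (f * (f - 1)) 2)).sum) = pairSum cs := by
  rw [PySem.Dict.foldl_insert_getD_add_one_eq_counter]
  have hv : (PySem.Dict.counter cs).values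
      = (PySem.Set.ofList cs).map (fun k => (cs.count k : Int)) := by
    show (PySem.Dict.counter cs).items.map (·.2)
        = (PySem.Set.ofList cs).map (fun k => (cs.count k : Int))
    rw [PySem.Dict.items_counter]
    simp [List.map_map, Function.comp]
  rw [hv, List.map_map]
  rfl

-- ===== VERDICT (by name: the statement is the Claim_ definition above) =====
theorem count_substrs_spec : Claim_equal_count_substrs := by
  intro string _
  show count_substrs string = count_substrs_alt string
  rw [count_substrs, count_substrs_alt]
  rw [countA_eq, countB_eq]
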